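-- pv_equiv track=rewrite | github.com/guiserafin/Exercicios-algoritmos | Lista 5/GSC-Alg05-ex-8.py | corretor
-- ===== SOURCE A (Python) =====
-- def corretor(texto):
--
--     texto = texto.lower()
--     texto = texto.strip()
--     saida = ""
--     elevarProximo = False
--
--     for i in range(0,len(texto)):
--         try:
--             if (texto[i-1] == "." or "!" or "?" or i == 0):
--                 saida += texto[i].upper()
--                 if texto[i] == " ":
--                     elevarProximo = True
--             else:
--                 if(elevarProximo):
--                     saida += texto[i].upper()
--                     elevarProximo = False
--                 else:
--                     saida += texto[i]
--         except IndexError: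
--             saida += texto[i]
--     return saida
-- ===== SOURCE B (Python) =====
-- def corretor(texto):
--     # A's branch condition `texto[i-1] == "." or "!" or ...` is always truthy,
--     # so A uppercases every character of the lowered, stripped text.
--     return texto.lower().strip().upper()
-- ===== Notes on version B (the rewrite author's own statement) =====
-- stated objective: simpler
-- what changed: A's per-character loop with dead branches (its condition `== '.' or '!' or ...` is always truthy) is replaced by the single closed-form expression lower().strip().upper() with no loop, accumulator or flag.
import Mathlib
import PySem

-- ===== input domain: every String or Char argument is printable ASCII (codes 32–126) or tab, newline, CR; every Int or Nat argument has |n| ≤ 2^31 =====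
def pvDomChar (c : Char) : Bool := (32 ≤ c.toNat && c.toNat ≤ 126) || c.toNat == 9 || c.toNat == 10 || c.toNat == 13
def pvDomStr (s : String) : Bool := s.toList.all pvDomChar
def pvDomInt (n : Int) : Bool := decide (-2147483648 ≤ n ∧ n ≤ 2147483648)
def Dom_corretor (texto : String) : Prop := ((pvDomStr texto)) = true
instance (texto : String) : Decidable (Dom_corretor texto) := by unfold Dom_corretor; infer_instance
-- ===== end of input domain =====

-- B replaces A's per-character loop (whose branch condition is always truthy) by the
-- closed form lower().strip().upper(); objective: simpler.

-- ===== PORT A =====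
-- loop body of A: on each index i, Python evaluates
--   `texto[i-1] == "." or "!" or "?" or i == 0`
-- where `or "!"` is a truthy non-empty string literal — ported literally as a disjunction
-- with True. The `except IndexError` arm (`saida += texto[i]`) corresponds to the `none`
-- case of pyGet?; it is unreachable since 0 ≤ i < len and -1 indexes a nonempty string.
def corretorStep (t : String) (st : List Char × Bool) (i : Int) : List Char × Bool :=
  match PySem.Str.pyGet? t i with
  | some c =>
    if (PySem.Str.pyGet? t (i - 1) = some '.') ∨ True ∨ True ∨ i = 0 then
      (st.1 ++ [PySem.Chars.upperChar c], if c = ' ' then true else st.2)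
    else
      if st.2 then (st.1 ++ [PySem.Chars.upperChar c], false)
      else (st.1 ++ [c], st.2)
  | none => st  -- except IndexError (unreachable for i in range(len(texto)))

def corretor (texto : String) : String :=
  let t := PySem.Str.strip (PySem.Str.lower texto)
  let r := (PySem.List.pyRange 0 (PySem.Str.len t) 1).foldl (corretorStep t) ([], false)
  String.ofList r.1

-- ===== PORT B =====
def corretor_alt (texto : String) : String :=
  PySem.Str.upper (PySem.Str.strip (PySem.Str.lower texto))

-- ===== PRECONDITION & SPEC =====
def Spec_corretor (texto : String) (out : String) : Prop := out = corretor_alt texto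
instance (texto : String) (out : String) : Decidable (Spec_corretor texto out) := by unfold Spec_corretor; infer_instance

-- ===== CLAIM (what is proved, stated in full; the proofs are below) =====
def Claim_equal_corretor : Prop := ∀ (texto : String), Dom_corretor texto → Spec_corretor texto (corretor texto)

-- ===== LEMMAS AND PROOFS =====

-- A's branch condition is always true, so each step appends the uppercased character.
theorem corretorStep_eq (t : String) (st : List Char × Bool) (i : Int) :
    corretorStep t st i =
      match PySem.Str.pyGet? t i with
      | some c => (st.1 ++ [PySem.Chars.upperChar c], if c = ' ' then true else st.2)
      | none => st := by
  unfold corretorStep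
  cases PySem.Str.pyGet? t i with
  | none => rfl
  | some c => simp

-- Loop invariant: the accumulated output over the first n indices is the uppercased prefix.
theorem corretor_loop (t : String) (n : Nat) (hn : n ≤ t.toList.length) :
    ∀ (acc : List Char) (b : Bool),
      ((PySem.List.pyRange 0 (n : Int) 1).foldl (corretorStep t) (acc, b)).1
        = acc ++ (t.toList.take n).map PySem.Chars.upperChar := by
  induction n with
  | zero => intro acc b; simp [PySem.List.pyRange_one_eq_nil]
  | succ m ih =>
    intro acc b
    have hm : m < t.toList.length := hn
    have hsplit : PySem.List.pyRange 0 ((m + 1 : Nat) : Int) 1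
        = PySem.List.pyRange 0 (m : Int) 1 ++ [(m : Int)] := by
      have h0 : (0 : Int) ≤ (m : Int) := by exact_mod_cast Nat.zero_le m
      have := PySem.List.pyRange_one_succ_right (a := 0) (b := (m : Int)) h0
      push_cast
      exact this
    rw [hsplit, List.foldl_append]
    rcases hres : (PySem.List.pyRange 0 (m : Int) 1).foldl (corretorStep t) (acc, b) with ⟨o, fl⟩
    have ho : o = acc ++ (t.toList.take m).map PySem.Chars.upperChar := by
      have := ih (Nat.le_of_lt hm) acc b
      rw [hres] at this; exact this
    have hget : PySem.Str.pyGet? t (m : Int) = some t.toList[m] := by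
      simp [PySem.List.pyGet?_natCast, List.getElem?_eq_getElem hm]
    simp only [List.foldl_cons, List.foldl_nil, corretorStep_eq, hget]
    rw [ho]
    simp only [List.map_take]
    rw [List.take_add_one, List.getElem?_eq_getElem (by simpa using hm)]
    simp

-- ===== VERDICT (by name: the statement is the Claim_ definition above) =====
theorem corretor_spec : Claim_equal_corretor := by
  intro texto _
  unfold Spec_corretor corretor corretor_alt
  have h := corretor_loop (PySem.Str.strip (PySem.Str.lower texto))
      (PySem.Str.strip (PySem.Str.lower texto)).toList.length (le_refl _) [] false
  simp only [PySem.Str.len_eq] at *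
  rw [h]
  simp [PySem.Str.upper, PySem.Chars.upper]
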